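-- pv_equiv track=rewrite | github.com/Ramc26/agentic_resources | resources/selectors.py | rank_files_by_query
-- ===== SOURCE A (Python) =====
-- def tokenize(text: str) -> set[str]:
--     return {t for t in ''.join(c if c.isalnum() else ' ' for c in text.lower()).split() if t}
--
-- def rank_files_by_query(filenames: list[str], query: str) -> list[str]:
--     """Simple relevance ranking by token overlap with special-casing common intents."""
--     q = query.lower()
--     q_tokens = tokenize(q)
--     if not filenames:
--         return []
--     if 'log' in q:
--         candidates = [f for f in filenames if 'log' in f.lower()]
--         if candidates:
--             return sorted(candidates)
--     if 'note' in q or 'meeting' in q or 'discussion' in q: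
--         for name in ('project_notes.txt', 'notes.txt'):
--             for f in filenames:
--                 if f.lower() == name:
--                     return [f]
--     def score(name: str) -> int:
--         tokens = tokenize(name)
--         return len(tokens & q_tokens)
--     return [name for name in sorted(filenames, key=lambda n: (-score(n), n)) if score(name) > 0][:3]
-- ===== SOURCE B (Python) =====
-- def tokenize(text: str) -> set[str]:
--     return {t for t in ''.join(c if c.isalnum() else ' ' for c in text.lower()).split() if t}
--
-- def rank_files_by_query(filenames: list[str], query: str) -> list[str]:
--     """Relevance ranking restructured: sort-then-filter log branch, one-pass note
--     lookup, and a size-3 insertion buffer instead of a full composite-key sort."""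
--     q = query.lower()
--     q_tokens = tokenize(q)
--     if 'log' in q:
--         cands = [f for f in sorted(filenames) if 'log' in f.lower()]
--         if cands:
--             return cands
--     if 'note' in q or 'meeting' in q or 'discussion' in q:
--         pn = nt = None
--         for f in filenames:
--             fl = f.lower()
--             if pn is None and fl == 'project_notes.txt':
--                 pn = f
--             if nt is None and fl == 'notes.txt':
--                 nt = f
--         chosen = pn if pn is not None else nt
--         if chosen is not None:
--             return [chosen]
--     top = []  # at most 3 (neg_score, name) pairs, kept sorted ascending
--     for name in filenames:
--         s = len(tokenize(name) & q_tokens)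
--         if s > 0:
--             item = (-s, name)
--             i = 0
--             while i < len(top) and top[i] <= item:
--                 i += 1
--             top.insert(i, item)
--             del top[3:]
--     return [name for _, name in top]
-- ===== Notes on version B (the rewrite author's own statement) =====
-- stated objective: faster
-- what changed: Every stage is restructured: the log branch filters the name-sorted list instead of sorting the filtered candidates, the note/meeting/discussion lookup becomes one pass that collects the first match for both target names simultaneously instead of A's two nested scans, and the final ranking replaces A's full composite-key sort + filter + [:3] with a single pass that scores each name once and maintains a sorted buffer of at most 3 (neg_score, name) pairs; the redundant empty-list check is dropped.
import Mathlib
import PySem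

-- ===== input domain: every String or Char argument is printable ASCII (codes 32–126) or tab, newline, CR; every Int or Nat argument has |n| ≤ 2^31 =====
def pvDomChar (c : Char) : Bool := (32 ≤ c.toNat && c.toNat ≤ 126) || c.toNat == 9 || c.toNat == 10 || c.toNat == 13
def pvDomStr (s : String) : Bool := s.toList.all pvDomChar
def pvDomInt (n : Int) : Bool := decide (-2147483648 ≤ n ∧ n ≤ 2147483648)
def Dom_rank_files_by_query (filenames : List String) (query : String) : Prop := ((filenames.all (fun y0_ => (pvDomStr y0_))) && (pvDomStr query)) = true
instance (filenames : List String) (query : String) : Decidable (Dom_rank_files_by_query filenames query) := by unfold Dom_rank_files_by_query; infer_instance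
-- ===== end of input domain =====

-- B restructures every stage: the log branch sorts first and then filters, the note lookup is a
-- single pass collecting both targets at once, and the final ranking keeps a size-3 sorted buffer
-- scoring each name once instead of A's full composite-key sort + filter + [:3] (objective: faster; measured).

-- shared helper: Python's tokenize(text) (identical source in both Source A and Source B)
def pyTokenize (text : List Char) : PySem.Set (List Char) :=
  PySem.Set.ofList ((PySem.Chars.split₀
    ((PySem.Chars.lower text).map (fun c => if PySem.Chars.isalnum c then c else ' '))).filter
      (fun t => decide (t ≠ [])))

-- shared helper: score(name) = len(tokenize(name) & q_tokens)  (identical in both sources)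
def pyScore (qT : PySem.Set (List Char)) (name : String) : Int :=
  PySem.Set.len (PySem.Set.inter (pyTokenize name.toList) qT)

-- ===== PORT A =====
-- A's inner double loop "for f in filenames: if f.lower() == name: return [f]"
def lookupLowerA (filenames : List String) (target : List Char) : Option String :=
  match filenames with
  | [] => none
  | f :: rest => if PySem.Chars.lower f.toList == target then some f else lookupLowerA rest target

def rank_files_by_query (filenames : List String) (query : String) : List String :=
  let q := PySem.Chars.lower query.toList
  let qTokens := pyTokenize q
  if filenames = [] then []
  else
    let logRes : Option (List String) :=
      if PySem.Chars.isIn "log".toList q then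
        let candidates := filenames.filter (fun f => PySem.Chars.isIn "log".toList (PySem.Chars.lower f.toList))
        if candidates ≠ [] then some (PySem.List.sorted candidates (fun n => n) false) else none
      else none
    match logRes with
    | some r => r
    | none =>
      let noteRes : Option (List String) :=
        if PySem.Chars.isIn "note".toList q || PySem.Chars.isIn "meeting".toList q
            || PySem.Chars.isIn "discussion".toList q then
          match lookupLowerA filenames "project_notes.txt".toList with
          | some f => some [f]
          | none => (lookupLowerA filenames "notes.txt".toList).map (fun f => [f])
        else none
      match noteRes with
      | some r => r
      | none =>
        ((PySem.List.sorted2 filenames (fun n => -(pyScore qTokens n)) (fun n => n) false).filter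
          (fun n => decide (0 < pyScore qTokens n))).take 3

-- ===== PORT B =====
-- B's tuple comparison item < y on (neg_score, name) pairs
def pairLt (a b : Int × String) : Bool := decide (a.1 < b.1) || (decide (a.1 = b.1) && decide (a.2 < b.2))

-- B's final loop: one pass, a sorted buffer of at most 3 (neg_score, name) pairs
def bScoreStage (qTokens : PySem.Set (List Char)) (filenames : List String) : List String :=
  (filenames.foldl (fun top name =>
      let s := pyScore qTokens name
      if 0 < s then (PySem.List.insertBy pairLt (-s, name) top).take 3 else top) []).map
    (fun x => x.2)

-- B's single pass collecting the first file lowering to each of the two targets, then preferring pn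
def bNotePick (filenames : List String) : Option String :=
  let st := filenames.foldl (fun (acc : Option String × Option String) f =>
      let fl := PySem.Chars.lower f.toList
      ((if acc.1.isNone && (fl == "project_notes.txt".toList) then some f else acc.1),
       (if acc.2.isNone && (fl == "notes.txt".toList) then some f else acc.2))) (none, none)
  match st.1 with
  | some f => some f
  | none => st.2

-- B after the log branch: the note special case, else the scored top-3
def bRest (filenames : List String) (q : List Char) (qTokens : PySem.Set (List Char)) : List String :=
  if PySem.Chars.isIn "note".toList q || PySem.Chars.isIn "meeting".toList q
      || PySem.Chars.isIn "discussion".toList q then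
    match bNotePick filenames with
    | some f => [f]
    | none => bScoreStage qTokens filenames
  else bScoreStage qTokens filenames

def rank_files_by_query_alt (filenames : List String) (query : String) : List String :=
  let q := PySem.Chars.lower query.toList
  let qTokens := pyTokenize q
  if PySem.Chars.isIn "log".toList q then
    let cands := (PySem.List.sorted filenames (fun n => n) false).filter
      (fun f => PySem.Chars.isIn "log".toList (PySem.Chars.lower f.toList))
    if cands ≠ [] then cands else bRest filenames q qTokens
  else bRest filenames q qTokens

-- ===== PRECONDITION & SPEC =====
def Spec_rank_files_by_query (filenames : List String) (query : String) (out : List String) : Prop := out = rank_files_by_query_alt filenames query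
instance (filenames : List String) (query : String) (out : List String) : Decidable (Spec_rank_files_by_query filenames query out) := by unfold Spec_rank_files_by_query; infer_instance

-- ===== CLAIM (what is proved, stated in full; the proofs are below) =====
def Claim_equal_rank_files_by_query : Prop := ∀ (filenames : List String) (query : String), Dom_rank_files_by_query filenames query → Spec_rank_files_by_query filenames query (rank_files_by_query filenames query)

-- ===== LEMMAS AND PROOFS =====

def pvPair (sc : String → Int) (n : String) : Int × String := (-(sc n), n)
def pvKey (sc : String → Int) (n : String) : Lex (Int × String) := toLex (-(sc n), n)

lemma pairLt_eq_key (sc : String → Int) (a b : String) :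
    pairLt (pvPair sc a) (pvPair sc b) = decide (pvKey sc a < pvKey sc b) := by
  simp only [pairLt, pvPair, pvKey]
  rw [Bool.eq_iff_iff]
  simp only [Bool.or_eq_true, Bool.and_eq_true, decide_eq_true_eq]
  rw [Prod.Lex.lt_iff]
  simp

lemma sorted2_lt_eq_key (sc : String → Int) (a b : String) :
    ((decide ((-(sc a)) < (-(sc b)))) ||
      (!(decide ((-(sc b)) < (-(sc a)))) && decide (a < b)))
      = decide (pvKey sc a < pvKey sc b) := by
  simp only [pvKey]
  rw [Bool.eq_iff_iff]
  simp only [Bool.or_eq_true, Bool.and_eq_true, Bool.not_eq_true', decide_eq_true_eq,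
    decide_eq_false_iff_not]
  rw [Prod.Lex.lt_iff]
  simp only [ofLex_toLex]
  constructor
  · rintro (h | ⟨h1, h2⟩)
    · exact Or.inl h
    · by_cases hx : -(sc a) < -(sc b)
      · exact Or.inl hx
      · exact Or.inr ⟨by omega, h2⟩
  · rintro (h | ⟨h1, h2⟩)
    · exact Or.inl h
    · exact Or.inr ⟨by omega, h2⟩

lemma take_insertBy {α : Type} (b : α → α → Bool) (x : α) (s : List α) (k : Nat) :
    (PySem.List.insertBy b x (s.take k)).take k = (PySem.List.insertBy b x s).take k := by
  induction s generalizing k with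
  | nil => simp
  | cons y ys ih =>
    cases k with
    | zero => simp
    | succ m =>
      simp only [List.take_succ_cons, PySem.List.insertBy]
      by_cases h : b x y
      · simp only [h, if_true, List.take_succ_cons]
        cases m with
        | zero => simp
        | succ m' => simp [List.take_take]
      · simp [h, ih]

lemma insertBy_map {α β : Type} (bP : β → β → Bool) (g : α → β) (x : α) (l : List α) :
    PySem.List.insertBy bP (g x) (l.map g)
      = (PySem.List.insertBy (fun a b => bP (g a) (g b)) x l).map g := by
  induction l with
  | nil => rfl
  | cons y ys ih =>
    simp only [List.map_cons, PySem.List.insertBy]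
    by_cases h : bP (g x) (g y) <;> simp [h, ih]

lemma pairwise_foldl_insertBy (sc : String → Int) (l : List String) (acc : List String)
    (h : acc.Pairwise (fun a b => pvKey sc a ≤ pvKey sc b)) :
    (l.foldl (fun acc x => PySem.List.insertBy (fun a b => decide (pvKey sc a < pvKey sc b)) x acc) acc).Pairwise
      (fun a b => pvKey sc a ≤ pvKey sc b) := by
  induction l generalizing acc with
  | nil => exact h
  | cons x xs ih =>
    exact ih _ (PySem.List.insertBy_pairwise_le (pvKey sc) x acc h)

lemma foldl_take3 (sc : String → Int) (l : List String) (full : List (Int × String)) :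
    l.foldl (fun top name =>
        let s := sc name
        if 0 < s then (PySem.List.insertBy pairLt (-s, name) top).take 3 else top) (full.take 3)
      = (l.foldl (fun top name =>
          let s := sc name
          if 0 < s then PySem.List.insertBy pairLt (-s, name) top else top) full).take 3 := by
  induction l generalizing full with
  | nil => rfl
  | cons x xs ih =>
    simp only [List.foldl_cons]
    by_cases h : 0 < sc x
    · simp only [h, if_true]
      rw [take_insertBy]
      exact ih _
    · simp only [h, if_false]
      exact ih _

lemma foldl_pairs_map (sc : String → Int) (l : List String) (acc : List String) :
    l.foldl (fun top name =>
        let s := sc name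
        if 0 < s then PySem.List.insertBy pairLt (-s, name) top else top) (acc.map (pvPair sc))
      = (l.foldl (fun top name =>
          if 0 < sc name then
            PySem.List.insertBy (fun a b => decide (pvKey sc a < pvKey sc b)) name top
          else top) acc).map (pvPair sc) := by
  induction l generalizing acc with
  | nil => rfl
  | cons x xs ih =>
    simp only [List.foldl_cons]
    by_cases h : 0 < sc x
    · simp only [h, if_true]
      have hfg : (fun a b => pairLt (pvPair sc a) (pvPair sc b))
          = (fun a b : String => decide (pvKey sc a < pvKey sc b)) :=
        funext fun a => funext fun b => pairLt_eq_key sc a b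
      have hins : PySem.List.insertBy pairLt (-(sc x), x) (acc.map (pvPair sc))
          = (PySem.List.insertBy (fun a b => decide (pvKey sc a < pvKey sc b)) x acc).map (pvPair sc) := by
        rw [show ((-(sc x), x) : Int × String) = pvPair sc x from rfl,
          insertBy_map pairLt (pvPair sc) x acc, hfg]
      rw [hins, ih]
    · simp only [h, if_false, ih]

lemma sorted2_eq_foldl_key (sc : String → Int) (m : List String) :
    PySem.List.sorted2 m (fun n => -(sc n)) (fun n => n) false
      = m.foldl (fun acc x => PySem.List.insertBy (fun a b => decide (pvKey sc a < pvKey sc b)) x acc) [] := by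
  have hb : (fun a b : String =>
      decide ((-(sc a)) < (-(sc b))) || (!decide ((-(sc b)) < (-(sc a))) && decide (a < b)))
      = (fun a b : String => decide (pvKey sc a < pvKey sc b)) :=
    funext fun a => funext fun b => sorted2_lt_eq_key sc a b
  simp only [PySem.List.sorted2, Bool.false_eq_true, if_false]
  simp only [hb]

lemma filter_sorted2 (sc : String → Int) (p : String → Bool) (l : List String) :
    (PySem.List.sorted2 l (fun n => -(sc n)) (fun n => n) false).filter p
      = PySem.List.sorted2 (l.filter p) (fun n => -(sc n)) (fun n => n) false := by
  have hpair : ∀ (m : List String),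
      (PySem.List.sorted2 m (fun n => -(sc n)) (fun n => n) false).Pairwise
        (fun a b => pvKey sc a ≤ pvKey sc b) := by
    intro m
    rw [sorted2_eq_foldl_key]
    exact pairwise_foldl_insertBy sc m [] (List.Pairwise.nil)
  apply List.Perm.eq_of_pairwise (le := fun a b => pvKey sc a ≤ pvKey sc b)
  · intro a b _ _ hab hba
    have hk : pvKey sc a = pvKey sc b := le_antisymm hab hba
    simpa [pvKey, toLex] using congrArg (fun k => (ofLex k).2) hk
  · exact List.Pairwise.filter p (hpair l)
  · exact hpair (l.filter p)
  · exact ((PySem.List.sorted2_perm l _ _ false).filter p).trans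
      (PySem.List.sorted2_perm (l.filter p) _ _ false).symm

-- A's final stage equals B's size-3 buffer fold
lemma final_stage_eq (sc : String → Int) (l : List String) :
    ((PySem.List.sorted2 l (fun n => -(sc n)) (fun n => n) false).filter
        (fun n => decide (0 < sc n))).take 3
      = (l.foldl (fun top name =>
          let s := sc name
          if 0 < s then (PySem.List.insertBy pairLt (-s, name) top).take 3 else top) []).map
        (fun x => x.2) := by
  rw [show ([] : List (Int × String)) = ([] : List (Int × String)).take 3 from rfl,
    foldl_take3 sc l []]
  rw [show ([] : List (Int × String)) = (([] : List String).map (pvPair sc)) from rfl,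
    foldl_pairs_map sc l []]
  rw [List.map_take, List.map_map]
  rw [show ((fun x : Int × String => x.2) ∘ pvPair sc) = id from rfl, List.map_id]
  rw [filter_sorted2, sorted2_eq_foldl_key, List.foldl_filter]
  simp only [decide_eq_true_eq]

-- A's hand-rolled lookup is find?
lemma lookupLowerA_eq_find? (filenames : List String) (target : List Char) :
    lookupLowerA filenames target = filenames.find? (fun f => PySem.Chars.lower f.toList == target) := by
  induction filenames with
  | nil => rfl
  | cons f rest ih =>
    simp only [lookupLowerA, List.find?_cons, ih]
    by_cases h : PySem.Chars.lower f.toList = target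
    · simp [h]
    · simp [beq_eq_false_iff_ne.2 h]

-- B's single collecting pass computes the two find?s (fold invariant)
lemma notePick_fold (t1 t2 : List Char) (l : List String) (a b : Option String) :
    l.foldl (fun (acc : Option String × Option String) f =>
        let fl := PySem.Chars.lower f.toList
        ((if acc.1.isNone && (fl == t1) then some f else acc.1),
         (if acc.2.isNone && (fl == t2) then some f else acc.2))) (a, b)
      = (a.or (l.find? (fun f => PySem.Chars.lower f.toList == t1)),
         b.or (l.find? (fun f => PySem.Chars.lower f.toList == t2))) := by
  induction l generalizing a b with
  | nil => simp
  | cons f rest ih =>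
    simp only [List.foldl_cons]
    rw [ih]
    cases hb1 : (PySem.Chars.lower f.toList == t1) <;>
      cases hb2 : (PySem.Chars.lower f.toList == t2) <;>
        cases a <;> cases b <;>
          simp [hb1, hb2, Option.or]

lemma bNotePick_eq (l : List String) :
    bNotePick l = (l.find? (fun f => PySem.Chars.lower f.toList == "project_notes.txt".toList)).or
      (l.find? (fun f => PySem.Chars.lower f.toList == "notes.txt".toList)) := by
  unfold bNotePick
  rw [notePick_fold "project_notes.txt".toList "notes.txt".toList]
  cases l.find? (fun f => PySem.Chars.lower f.toList == "project_notes.txt".toList) <;>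
    simp [Option.or]

-- the log branch: filtering the sorted list is sorting the filtered list
lemma filter_sorted_id (p : String → Bool) (l : List String) :
    (PySem.List.sorted l (fun n => n) false).filter p
      = PySem.List.sorted (l.filter p) (fun n => n) false := by
  symm
  exact PySem.List.sorted_id_eq_of_perm_of_pairwise _ _
    ((PySem.List.sorted_perm l (fun n => n) false).filter p)
    (List.Pairwise.filter p (PySem.List.sorted_pairwise l (fun n => n)))

-- A's remainder after the log branch equals bRest
lemma rest_eq (filenames : List String) (q : List Char) :
    (match (if PySem.Chars.isIn "note".toList q || PySem.Chars.isIn "meeting".toList q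
          || PySem.Chars.isIn "discussion".toList q then
        match lookupLowerA filenames "project_notes.txt".toList with
        | some f => some [f]
        | none => (lookupLowerA filenames "notes.txt".toList).map (fun f => [f])
      else none) with
    | some r => r
    | none =>
      ((PySem.List.sorted2 filenames (fun n => -(pyScore (pyTokenize q) n)) (fun n => n) false).filter
        (fun n => decide (0 < pyScore (pyTokenize q) n))).take 3)
      = bRest filenames q (pyTokenize q) := by
  unfold bRest
  by_cases hc : PySem.Chars.isIn "note".toList q || PySem.Chars.isIn "meeting".toList q
      || PySem.Chars.isIn "discussion".toList q
  · simp only [hc, if_true, bNotePick_eq, lookupLowerA_eq_find?]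
    cases filenames.find? (fun f => PySem.Chars.lower f.toList == "project_notes.txt".toList) with
    | some f => rfl
    | none =>
      cases filenames.find? (fun f => PySem.Chars.lower f.toList == "notes.txt".toList) with
      | some f => rfl
      | none =>
        simp only [Option.map_none, Option.or]
        exact final_stage_eq (pyScore (pyTokenize q)) filenames
  · simp only [hc]
    exact final_stage_eq (pyScore (pyTokenize q)) filenames

-- ===== VERDICT (by name: the statement is the Claim_ definition above) =====
theorem rank_files_by_query_spec : Claim_equal_rank_files_by_query := by
  intro filenames query _
  unfold Spec_rank_files_by_query
  by_cases hf : filenames = []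
  · subst hf
    simp [rank_files_by_query, rank_files_by_query_alt, bRest, bNotePick, bScoreStage,
      PySem.List.sorted]
  · simp only [rank_files_by_query, rank_files_by_query_alt, if_neg hf]
    by_cases hlog : PySem.Chars.isIn "log".toList (PySem.Chars.lower query.toList) = true
    · rw [if_pos hlog, if_pos hlog, filter_sorted_id]
      by_cases hc : List.filter
          (fun f => PySem.Chars.isIn "log".toList (PySem.Chars.lower f.toList)) filenames = []
      · have h2 : ¬(PySem.List.sorted (List.filter
            (fun f => PySem.Chars.isIn "log".toList (PySem.Chars.lower f.toList)) filenames)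
            (fun n => n) false ≠ []) :=
          not_not_intro (by rw [hc]; exact (PySem.List.sorted_eq_nil_iff _ _ _).mpr rfl)
        rw [if_neg (not_not_intro hc), if_neg h2]
        exact rest_eq filenames (PySem.Chars.lower query.toList)
      · rw [if_pos hc]
        have hs : PySem.List.sorted (List.filter
            (fun f => PySem.Chars.isIn "log".toList (PySem.Chars.lower f.toList)) filenames)
            (fun n => n) false ≠ [] := by
          intro h
          exact hc ((PySem.List.sorted_eq_nil_iff _ _ _).mp h)
        rw [if_pos hs]
    · rw [if_neg hlog, if_neg hlog]
      exact rest_eq filenames (PySem.Chars.lower query.toList)
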